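-- pv_equiv track=rewrite | github.com/FreddyMachaca/INF-111 | PRACTICA PRIMER PARCIAL/Ejercicio12/Python/GenerarSecuencia.py | generar_secuencia
-- ===== SOURCE A (Python) =====
-- def generar_secuencia(n):
--     secuencia = [1, 3]
--     indice = 1
--
--     for i in range(2, n):
--         if i % 2 == 0:
--             indice += 1
--         else:
--             indice += 2
--
--         secuencia.append(indice)
--
--     return secuencia
-- ===== SOURCE B (Python) =====
-- def generar_secuencia(n):
--     # simpler: each element from its index by the closed form 2*i - 1 - i//2,
--     # no running accumulator and no parity branch
--     return [1, 3] + [2 * i - 1 - i // 2 for i in range(2, n)]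
-- ===== Notes on version B (the rewrite author's own statement) =====
-- stated objective: simpler
-- what changed: Replaces the running 'indice' accumulator with alternating +1/+2 steps by a one-line comprehension computing each element independently via the closed form 2*i - 1 - i//2.
import Mathlib
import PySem

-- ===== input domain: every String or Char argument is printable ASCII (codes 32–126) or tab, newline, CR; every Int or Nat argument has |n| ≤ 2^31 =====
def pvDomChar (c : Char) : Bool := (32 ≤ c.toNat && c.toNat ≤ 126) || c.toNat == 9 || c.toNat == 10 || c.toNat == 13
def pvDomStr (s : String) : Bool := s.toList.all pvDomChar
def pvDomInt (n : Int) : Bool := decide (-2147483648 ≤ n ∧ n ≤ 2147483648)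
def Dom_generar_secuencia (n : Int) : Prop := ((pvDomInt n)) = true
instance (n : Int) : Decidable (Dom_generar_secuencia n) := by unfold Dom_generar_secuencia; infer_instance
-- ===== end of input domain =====

-- B replaces A's running accumulator (with a parity if/else) by a closed-form
-- comprehension 2*i - 1 - i//2 per index; objective: simpler.


-- ===== PORT A =====
def generar_secuencia (n : Int) : List Int :=
  ((PySem.List.pyRange 2 n 1).foldl
    (fun (st : List Int × Int) i =>
      let indice := if PySem.Int.mod i 2 = 0 then st.2 + 1 else st.2 + 2
      (st.1 ++ [indice], indice))
    ([1, 3], 1)).1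

-- ===== PORT B =====
def generar_secuencia_alt (n : Int) : List Int :=
  [1, 3] ++ (PySem.List.pyRange 2 n 1).map (fun i => 2 * i - 1 - PySem.Int.floordiv i 2)

-- ===== PRECONDITION & SPEC =====
def Spec_generar_secuencia (n : Int) (out : List Int) : Prop := out = generar_secuencia_alt n
instance (n : Int) (out : List Int) : Decidable (Spec_generar_secuencia n out) := by unfold Spec_generar_secuencia; infer_instance

-- ===== CLAIM (what is proved, stated in full; the proofs are below) =====
def Claim_equal_generar_secuencia : Prop := ∀ (n : Int), Dom_generar_secuencia n → Spec_generar_secuencia n (generar_secuencia n)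

-- ===== LEMMAS AND PROOFS =====

-- closed form of A's running index after processing i
def pvC (i : Int) : Int := 2 * i - 1 - PySem.Int.floordiv i 2

-- A's loop body
def pvStep (st : List Int × Int) (i : Int) : List Int × Int :=
  let indice := if PySem.Int.mod i 2 = 0 then st.2 + 1 else st.2 + 2
  (st.1 ++ [indice], indice)

lemma pvC_step (m : Int) :
    (if PySem.Int.mod m 2 = 0 then pvC (m - 1) + 1 else pvC (m - 1) + 2) = pvC m := by
  unfold pvC
  rw [PySem.Int.mod_eq_emod_of_pos (by omega : (0:Int) < 2),
      PySem.Int.floordiv_eq_ediv_of_pos (by omega : (0:Int) < 2) (a := m - 1),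
      PySem.Int.floordiv_eq_ediv_of_pos (by omega : (0:Int) < 2) (a := m)]
  split_ifs with h <;> omega

lemma pvLoop (k : Nat) : ∀ (n m : Int) (acc : List Int), 2 ≤ m → (n - m).toNat = k →
    ((PySem.List.pyRange m n 1).foldl pvStep (acc, pvC (m - 1))).1
      = acc ++ (PySem.List.pyRange m n 1).map pvC := by
  induction k with
  | zero =>
    intro n m acc hm hk
    rw [PySem.List.pyRange_one_eq_nil (by omega)]
    simp
  | succ k ih =>
    intro n m acc hm hk
    rw [PySem.List.pyRange_one_cons (by omega)]
    simp only [List.foldl_cons, List.map_cons]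
    have hstep : pvStep (acc, pvC (m - 1)) m = (acc ++ [pvC m], pvC m) := by
      unfold pvStep
      rw [← pvC_step m]
    rw [hstep]
    have := ih n (m + 1) (acc ++ [pvC m]) (by omega) (by omega)
    simp only [show m + 1 - 1 = m by ring] at this
    rw [this, List.append_assoc]
    rfl

-- ===== VERDICT (by name: the statement is the Claim_ definition above) =====
theorem generar_secuencia_spec : Claim_equal_generar_secuencia := by
  intro n _
  unfold Spec_generar_secuencia generar_secuencia generar_secuencia_alt
  have h1 : pvC 1 = 1 := by decide
  have := pvLoop (n - 2).toNat n 2 [1, 3] (by omega) rfl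
  simp only [show (2 : Int) - 1 = 1 by ring, h1] at this
  exact this
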